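-- pv_equiv track=rewrite | github.com/gheenie/coding-tests | codewars/anagram_difference.py | anagram_difference
-- ===== SOURCE A (Python) =====
-- def anagram_difference(w1, w2):
--     # Increase a counter every time a pair of match is found.
--     # Double it and subtract that from the total num of letters
--
--     matched_letters_count = {}
--
--     for letter1 in w1:
--         matches = 0
--
--         for letter2 in w2:
--             if letter1 == letter2:
--                 matches += 1
--
--         if matches > 0:
--             if letter1 not in matched_letters_count:
--                 matched_letters_count[letter1] = 1
--             elif matches > matched_letters_count[letter1]:
--                 matched_letters_count[letter1] += 1
--
--     return  len(w1) + len(w2) - sum(matched_letters_count.values()) * 2 # the number of characters to remove from w1 and w2 to make them anagrams of each other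
-- ===== SOURCE B (Python) =====
-- def anagram_difference(w1, w2):
--     a = sorted(w1)
--     b = sorted(w2)
--     i = j = common = 0
--     while i < len(a) and j < len(b):
--         if a[i] == b[j]:
--             common += 1
--             i += 1
--             j += 1
--         elif a[i] < b[j]:
--             i += 1
--         else:
--             j += 1
--     return len(w1) + len(w2) - 2 * common
-- ===== Notes on version B (the rewrite author's own statement) =====
-- stated objective: faster
-- what changed: Replaces A's O(n*m) nested rescan of w2 for every character of w1 (plus an incrementally-capped count dict) with sorting both words and a single two-pointer merge pass that counts common characters.
import Mathlib
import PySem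

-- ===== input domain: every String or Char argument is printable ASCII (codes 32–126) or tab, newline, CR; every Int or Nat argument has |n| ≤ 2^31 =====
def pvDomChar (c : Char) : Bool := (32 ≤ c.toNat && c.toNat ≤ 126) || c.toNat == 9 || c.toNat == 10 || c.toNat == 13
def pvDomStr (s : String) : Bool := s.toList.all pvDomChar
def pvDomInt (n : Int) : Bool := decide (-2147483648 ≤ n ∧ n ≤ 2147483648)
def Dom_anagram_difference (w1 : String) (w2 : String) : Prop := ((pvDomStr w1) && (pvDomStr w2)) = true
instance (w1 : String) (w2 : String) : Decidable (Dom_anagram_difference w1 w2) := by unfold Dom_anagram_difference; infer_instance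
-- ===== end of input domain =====

-- B replaces A's nested rescan + incrementally capped dict with sort-both + one two-pointer merge pass counting common characters.

-- ===== PORT A =====
-- loop body of A's outer 'for letter1 in w1' (dict of per-letter matched counts)
def pvStep (w2l : List Char) (d : PySem.Dict Char Int) (letter1 : Char) : PySem.Dict Char Int :=
  let matchCnt : Int := w2l.foldl (fun m letter2 => if letter1 == letter2 then m + 1 else m) 0
  if matchCnt > 0 then
    if !(d.contains letter1) then d.insert letter1 1
    else if matchCnt > d.getD letter1 0 then d.insert letter1 (d.getD letter1 0 + 1)
    else d
  else d

def anagram_difference (w1 : String) (w2 : String) : Int :=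
  let matched_letters_count := w1.toList.foldl (pvStep w2.toList) PySem.Dict.empty
  PySem.Str.len w1 + PySem.Str.len w2 - matched_letters_count.values.sum * 2

-- ===== PORT B =====
-- the while-loop of Source B: walk both sorted lists, counting equal heads
def pvMergeCommon : List Char → List Char → Int
  | [], _ => 0
  | _ :: _, [] => 0
  | x :: xs, y :: ys =>
    if x = y then 1 + pvMergeCommon xs ys
    else if x < y then pvMergeCommon xs (y :: ys)
    else pvMergeCommon (x :: xs) ys
termination_by l1 l2 => l1.length + l2.length

def anagram_difference_alt (w1 : String) (w2 : String) : Int :=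
  let a := PySem.List.sorted w1.toList (fun x => x) false
  let b := PySem.List.sorted w2.toList (fun x => x) false
  PySem.Str.len w1 + PySem.Str.len w2 - 2 * pvMergeCommon a b

-- ===== PRECONDITION & SPEC =====
def Spec_anagram_difference (w1 : String) (w2 : String) (out : Int) : Prop := out = anagram_difference_alt w1 w2
instance (w1 : String) (w2 : String) (out : Int) : Decidable (Spec_anagram_difference w1 w2 out) := by unfold Spec_anagram_difference; infer_instance

-- ===== CLAIM (what is proved, stated in full; the proofs are below) =====
def Claim_equal_anagram_difference : Prop := ∀ (w1 : String) (w2 : String), Dom_anagram_difference w1 w2 → Spec_anagram_difference w1 w2 (anagram_difference w1 w2)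

-- ===== LEMMAS AND PROOFS =====

-- count-min facts about multiset intersection used by both sides
lemma pv_inter_cons_left_of_le {a : Char} {s t : Multiset Char} (h : t.count a ≤ s.count a) :
    (a ::ₘ s) ∩ t = s ∩ t := by
  ext c
  by_cases hc : c = a
  · subst hc; simp [Multiset.count_inter]; omega
  · simp [Multiset.count_inter, Multiset.count_cons, hc]

lemma pv_inter_cons_left_of_lt {a : Char} {s t : Multiset Char} (h : s.count a < t.count a) :
    (a ::ₘ s) ∩ t = a ::ₘ (s ∩ t) := by
  ext c
  by_cases hc : c = a
  · subst hc; simp [Multiset.count_inter]; omega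
  · simp [Multiset.count_inter, Multiset.count_cons, hc]

lemma pv_inter_cons_right_of_le {a : Char} {s t : Multiset Char} (h : s.count a ≤ t.count a) :
    s ∩ (a ::ₘ t) = s ∩ t := by
  ext c
  by_cases hc : c = a
  · subst hc; simp [Multiset.count_inter]; omega
  · simp [Multiset.count_inter, Multiset.count_cons, hc]

-- B's merge pass over two sorted lists computes the size of the multiset intersection
lemma pvMergeCommon_eq (l1 l2 : List Char) (h1 : l1.Pairwise (· ≤ ·)) (h2 : l2.Pairwise (· ≤ ·)) :
    pvMergeCommon l1 l2 = (((l1 : Multiset Char) ∩ (l2 : Multiset Char)).card : Int) := by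
  revert h1 h2
  induction l1, l2 using pvMergeCommon.induct with
  | case1 l2 => intro _ _; simp [pvMergeCommon]
  | case2 x xs => intro _ _; simp [pvMergeCommon]
  | case3 xs y ys ih =>
    intro h1 h2
    have hco : ((y :: xs : List Char) : Multiset Char) ∩ ((y :: ys : List Char) : Multiset Char)
        = y ::ₘ ((xs : Multiset Char) ∩ (ys : Multiset Char)) := by
      ext c
      by_cases hc : c = y
      · subst hc; simp [Multiset.count_inter]
      · simp [Multiset.count_inter, Multiset.count_cons, hc]
    simp only [pvMergeCommon, hco, Multiset.card_cons, ih h1.tail h2.tail]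
    push_cast; ring
  | case4 x xs y ys hne hlt ih =>
    intro h1 h2
    have hx : x ∉ (y :: ys) := by
      intro hmem
      rcases List.mem_cons.mp hmem with h | h
      · exact hne h
      · exact absurd (lt_of_lt_of_le hlt (List.rel_of_pairwise_cons h2 h)) (lt_irrefl x)
    have hco : ((x :: xs : List Char) : Multiset Char) ∩ ((y :: ys : List Char) : Multiset Char)
        = ((xs : Multiset Char)) ∩ ((y :: ys : List Char) : Multiset Char) := by
      rw [← Multiset.cons_coe]
      exact pv_inter_cons_left_of_le (by simp [List.count_eq_zero_of_not_mem hx])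
    simp only [pvMergeCommon, if_neg hne, if_pos hlt, hco]
    exact ih h1.tail h2
  | case5 x xs y ys hne hnlt ih =>
    intro h1 h2
    have hyx : y < x := lt_of_le_of_ne (le_of_not_gt hnlt) (fun h => hne h.symm)
    have hy : y ∉ (x :: xs) := by
      intro hmem
      rcases List.mem_cons.mp hmem with h | h
      · exact hne h.symm
      · exact absurd (lt_of_lt_of_le hyx (List.rel_of_pairwise_cons h1 h)) (lt_irrefl y)
    have hco : ((x :: xs : List Char) : Multiset Char) ∩ ((y :: ys : List Char) : Multiset Char)
        = ((x :: xs : List Char) : Multiset Char) ∩ ((ys : Multiset Char)) := by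
      rw [← Multiset.cons_coe (a := y)]
      exact pv_inter_cons_right_of_le (by simp [List.count_eq_zero_of_not_mem hy])
    simp only [pvMergeCommon, if_neg hne, if_neg hnlt, hco]
    exact ih h1 h2.tail

-- what A's dict holds, per character, after processing a prefix p of w1
def pvVal (w2l p : List Char) (c : Char) : Option Int :=
  if 0 < min (p.count c) (w2l.count c) then some ((min (p.count c) (w2l.count c) : Nat) : Int) else none

lemma pvVal_append (w2l p : List Char) (a c : Char)
    (h : min ((p ++ [a]).count c) (w2l.count c) = min (p.count c) (w2l.count c)) :
    pvVal w2l (p ++ [a]) c = pvVal w2l p c := by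
  unfold pvVal; rw [h]

lemma pv_count_append_self (p : List Char) (a : Char) : (p ++ [a]).count a = p.count a + 1 := by
  simp [List.count_append]

lemma pv_count_append_ne {a c : Char} (p : List Char) (hc : c ≠ a) : (p ++ [a]).count c = p.count c := by
  simp [List.count_append, List.count_singleton]
  exact fun h => hc h.symm

lemma pv_sum_map_congr_single {l : List Char} (hnd : l.Nodup) {a : Char} (ha : a ∈ l)
    (f g : Char → Int) (h : ∀ c, c ≠ a → f c = g c) :
    (l.map f).sum = (l.map g).sum + f a - g a := by
  induction l with
  | nil => cases ha
  | cons x xs ih =>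
    by_cases hx : x = a
    · subst hx
      have hall : ∀ c ∈ xs, f c = g c := fun c hc => h c (fun hca => (List.nodup_cons.mp hnd).1 (hca ▸ hc))
      simp [List.map_congr_left hall]; ring
    · have ha' : a ∈ xs := by
        rcases List.mem_cons.mp ha with h' | h'
        · exact absurd h'.symm hx
        · exact h'
      have := ih (List.nodup_cons.mp hnd).2 ha'
      simp [h x hx, this]; ring

lemma pv_coe_append_singleton (p : List Char) (a : Char) :
    ((p ++ [a] : List Char) : Multiset Char) = a ::ₘ (p : Multiset Char) := by
  have h1 : ((p ++ [a] : List Char) : Multiset Char) = ((a :: p : List Char) : Multiset Char) :=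
    Multiset.coe_eq_coe.mpr (List.perm_append_singleton a p)
  rw [h1, ← Multiset.cons_coe]

-- invariant of A's outer loop: keys distinct, each key holds min(count in prefix, count in w2),
-- and the values sum to the size of the multiset intersection of the prefix with w2
lemma pvFold_spec (w2l : List Char) (p : List Char) :
    (p.foldl (pvStep w2l) PySem.Dict.empty).keys.Nodup ∧
    (∀ c, (p.foldl (pvStep w2l) PySem.Dict.empty).get? c = pvVal w2l p c) ∧
    (p.foldl (pvStep w2l) PySem.Dict.empty).values.sum
      = (((p : Multiset Char) ∩ (w2l : Multiset Char)).card : Int) := by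
  induction p using List.reverseRecOn with
  | nil =>
    refine ⟨by simpa using PySem.Dict.nodup_keys_empty (κ := Char) (ν := Int),
      fun c => by simp [PySem.Dict.get?_empty, pvVal], by simp [PySem.Dict.values, PySem.Dict.empty]⟩
  | append_singleton p a ih =>
    obtain ⟨hnd, hget, hsum⟩ := ih
    rw [List.foldl_append]
    simp only [List.foldl_cons, List.foldl_nil]
    have hmatches : (w2l.foldl (fun m letter2 => if a == letter2 then m + 1 else m) (0 : Int))
        = ((w2l.count a : Nat) : Int) := by
      have hcomm : (fun (m : Int) (letter2 : Char) => if a == letter2 then m + 1 else m)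
          = (fun (m : Int) (x : Char) => if x == a then m + 1 else m) := by
        funext m y
        by_cases h : y = a
        · simp [h]
        · simp [h, Ne.symm h]
      rw [hcomm, PySem.List.foldl_beq_add_one]; simp
    simp only [pvStep, hmatches]
    by_cases hm : 0 < w2l.count a
    · rw [if_pos (by exact_mod_cast hm)]
      by_cases hk : 0 < p.count a
      · -- letter already in the dict
        have hsome : (p.foldl (pvStep w2l) PySem.Dict.empty).get? a
            = some ((min (p.count a) (w2l.count a) : Nat) : Int) := by
          rw [hget a]; unfold pvVal; rw [if_pos (by omega)]
        have hcontt : (p.foldl (pvStep w2l) PySem.Dict.empty).contains a = true := by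
          rw [PySem.Dict.contains_eq_isSome_get?, hsome]; rfl
        have hgd : (p.foldl (pvStep w2l) PySem.Dict.empty).getD a 0
            = ((min (p.count a) (w2l.count a) : Nat) : Int) := by
          rw [PySem.Dict.getD_eq_get?_getD, hsome]; rfl
        simp only [hcontt, Bool.not_true, Bool.false_eq_true, if_false, hgd]
        by_cases hkm : p.count a < w2l.count a
        · -- strictly below the cap: A increments the stored count
          have hmin : min (p.count a) (w2l.count a) = p.count a := by omega
          have hcond : ((w2l.count a : Nat) : Int) > ((min (p.count a) (w2l.count a) : Nat) : Int) := by
            exact_mod_cast (show min (p.count a) (w2l.count a) < w2l.count a by omega)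
          rw [if_pos hcond]
          refine ⟨PySem.Dict.nodup_keys_insert _ _ _ hnd, fun c => ?_, ?_⟩
          · by_cases hc : c = a
            · rw [hc]
              rw [PySem.Dict.get?_insert_self]
              unfold pvVal
              rw [pv_count_append_self, if_pos (by omega)]
              have h2 : min (p.count a + 1) (w2l.count a) = p.count a + 1 := by omega
              rw [h2, hmin]
              push_cast; ring_nf
            · rw [PySem.Dict.get?_insert_of_ne _ _ hc, hget c]
              exact (pvVal_append w2l p a c (by rw [pv_count_append_ne p hc])).symm
          · have hkeys := PySem.Dict.keys_insert_of_contains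
              (p.foldl (pvStep w2l) PySem.Dict.empty)
              (((min (p.count a) (w2l.count a) : Nat) : Int) + 1) hcontt
            have hamem : a ∈ (p.foldl (pvStep w2l) PySem.Dict.empty).keys :=
              (PySem.Dict.contains_iff_mem_keys _ _).mp hcontt
            have hnd' : ((p.foldl (pvStep w2l) PySem.Dict.empty).insert a
                (((min (p.count a) (w2l.count a) : Nat) : Int) + 1)).keys.Nodup := by
              rw [hkeys]; exact hnd
            have hcnt : ((p : Multiset Char)).count a < ((w2l : Multiset Char)).count a := by
              rw [Multiset.coe_count, Multiset.coe_count]; omega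
            have hfun : ∀ c : Char, ((p.foldl (pvStep w2l) PySem.Dict.empty).insert a
                (((min (p.count a) (w2l.count a) : Nat) : Int) + 1)).getD c 0
                = if c = a then ((min (p.count a) (w2l.count a) : Nat) : Int) + 1
                  else (p.foldl (pvStep w2l) PySem.Dict.empty).getD c 0 := fun c =>
              PySem.Dict.getD_insert _ _ _ _ _
            have hstep := pv_sum_map_congr_single hnd hamem
              (fun c => ((p.foldl (pvStep w2l) PySem.Dict.empty).insert a
                (((min (p.count a) (w2l.count a) : Nat) : Int) + 1)).getD c 0)
              (fun c => (p.foldl (pvStep w2l) PySem.Dict.empty).getD c 0)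
              (fun c hc => by simp only [hfun c, if_neg hc])
            rw [PySem.Dict.values_eq_map_keys _ hnd' 0, hkeys, hstep,
              ← PySem.Dict.values_eq_map_keys _ hnd 0, hsum,
              pv_coe_append_singleton, pv_inter_cons_left_of_lt hcnt]
            simp only [hgd, hmin, Multiset.card_cons]
            rw [PySem.Dict.getD_insert, if_pos rfl]
            omega
        · -- at the cap: A leaves the dict unchanged
          have hcond : ¬ (((w2l.count a : Nat) : Int) > ((min (p.count a) (w2l.count a) : Nat) : Int)) := by
            exact_mod_cast (show ¬ min (p.count a) (w2l.count a) < w2l.count a by omega)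
          rw [if_neg hcond]
          have hle : ((w2l : Multiset Char)).count a ≤ ((p : Multiset Char)).count a := by
            rw [Multiset.coe_count, Multiset.coe_count]; omega
          refine ⟨hnd, fun c => ?_, ?_⟩
          · rw [hget c]
            by_cases hc : c = a
            · rw [hc]
              exact (pvVal_append w2l p a a (by rw [pv_count_append_self]; omega)).symm
            · exact (pvVal_append w2l p a c (by rw [pv_count_append_ne p hc])).symm
          · rw [hsum, pv_coe_append_singleton, pv_inter_cons_left_of_le hle]
      · -- first occurrence of the letter in w1 that also occurs in w2
        have hk0 : p.count a = 0 := by omega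
        have hnone : (p.foldl (pvStep w2l) PySem.Dict.empty).get? a = none := by
          rw [hget a]; unfold pvVal; rw [if_neg (by omega)]
        have hcontf : (p.foldl (pvStep w2l) PySem.Dict.empty).contains a = false := by
          rw [PySem.Dict.contains_eq_isSome_get?, hnone]; rfl
        simp only [hcontf, Bool.not_false, if_true]
        refine ⟨PySem.Dict.nodup_keys_insert _ _ _ hnd, fun c => ?_, ?_⟩
        · by_cases hc : c = a
          · rw [hc]
            rw [PySem.Dict.get?_insert_self]
            unfold pvVal
            rw [pv_count_append_self, hk0, if_pos (by omega)]
            have h1 : min (0 + 1) (w2l.count a) = 1 := by omega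
            rw [h1]
            norm_num
          · rw [PySem.Dict.get?_insert_of_ne _ _ hc, hget c]
            exact (pvVal_append w2l p a c (by rw [pv_count_append_ne p hc])).symm
        · have hitems := PySem.Dict.items_insert_of_not_contains
            (p.foldl (pvStep w2l) PySem.Dict.empty) (1 : Int) hcontf
          have hcnt : ((p : Multiset Char)).count a < ((w2l : Multiset Char)).count a := by
            rw [Multiset.coe_count, Multiset.coe_count]; omega
          simp only [PySem.Dict.values] at hsum ⊢
          rw [hitems, List.map_append, List.sum_append, hsum,
            pv_coe_append_singleton, pv_inter_cons_left_of_lt hcnt]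
          simp only [Multiset.card_cons, List.map_cons, List.map_nil, List.sum_cons, List.sum_nil]
          push_cast; ring
    · -- the letter does not occur in w2: A skips it entirely
      have hm0 : w2l.count a = 0 := by omega
      have hcond : ¬ (((w2l.count a : Nat) : Int) > 0) := by
        exact_mod_cast (show ¬ (0 < w2l.count a) by omega)
      rw [if_neg hcond]
      have hle : ((w2l : Multiset Char)).count a ≤ ((p : Multiset Char)).count a := by
        rw [Multiset.coe_count, Multiset.coe_count]; omega
      refine ⟨hnd, fun c => ?_, ?_⟩
      · rw [hget c]
        by_cases hc : c = a
        · rw [hc]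
          exact (pvVal_append w2l p a a (by rw [pv_count_append_self, hm0]; omega)).symm
        · exact (pvVal_append w2l p a c (by rw [pv_count_append_ne p hc])).symm
      · rw [hsum, pv_coe_append_singleton, pv_inter_cons_left_of_le hle]

-- ===== VERDICT (by name: the statement is the Claim_ definition above) =====
theorem anagram_difference_spec : Claim_equal_anagram_difference := by
  unfold Claim_equal_anagram_difference
  intro w1 w2 _
  unfold Spec_anagram_difference anagram_difference anagram_difference_alt
  obtain ⟨-, -, hsum⟩ := pvFold_spec w2.toList w1.toList
  have hp1 : (PySem.List.sorted w1.toList (fun x => x) false).Pairwise (· ≤ ·) :=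
    PySem.List.sorted_pairwise w1.toList (fun x => x)
  have hp2 : (PySem.List.sorted w2.toList (fun x => x) false).Pairwise (· ≤ ·) :=
    PySem.List.sorted_pairwise w2.toList (fun x => x)
  have hB := pvMergeCommon_eq _ _ hp1 hp2
  have hc1 : ((PySem.List.sorted w1.toList (fun x => x) false : List Char) : Multiset Char)
      = (w1.toList : Multiset Char) :=
    Multiset.coe_eq_coe.mpr (PySem.List.sorted_perm w1.toList (fun x => x) false)
  have hc2 : ((PySem.List.sorted w2.toList (fun x => x) false : List Char) : Multiset Char)
      = (w2.toList : Multiset Char) :=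
    Multiset.coe_eq_coe.mpr (PySem.List.sorted_perm w2.toList (fun x => x) false)
  simp only [hsum, hB, hc1, hc2]
  ring
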